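-- pv_equiv track=rewrite | github.com/manas-17045/LeetcodeSolutions | Leetcode 3501-3600/3537/3537.py | specialGrid
-- ===== SOURCE A (Python) =====
-- def specialGrid(n: int) -> list[list[int]]:
--     """
--     Fills a special grid of size 2^n x 2^n according to a specific recursive pattern.
--
--     :param n: An integer representing the level of the grid. The grid will have dimensions 2^n x 2^n.
--     :return: A list of lists of integers representing the filled special grid.
--     """
--     currentGrid = [[0]]
--
--     if n == 0:
--         return currentGrid
--
--     for i in range(1, n + 1):
--         prevDim = 1 << (i - 1)
--         currentDim = 1 << i
--
--         newGrid = [[0] * currentDim for _ in range(currentDim)]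
--
--         offsetK = prevDim * prevDim
--
--         trOffset = 0
--         brOffset = offsetK
--         blOffset = 2 * offsetK
--         tlOffset = 3 * offsetK
--
--         for r in range(prevDim):
--             for c in range(prevDim):
--                 val = currentGrid[r][c]
--
--                 newGrid[r][c] = val + tlOffset
--                 newGrid[r][c + prevDim] = val + trOffset
--                 newGrid[r + prevDim][c] = val + blOffset
--                 newGrid[r + prevDim][c + prevDim] = val + brOffset
--
--         currentGrid = newGrid
--
--     return currentGrid
-- ===== SOURCE B (Python) =====
-- def specialGrid(n: int) -> list[list[int]]:
--     size = 1 << n if n > 0 else 1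
--     grid = []
--     for r in range(size):
--         row = []
--         for c in range(size):
--             val = 0
--             rr, cc, dim = r, c, size
--             while dim > 1:
--                 half = dim >> 1
--                 k = half * half
--                 if rr < half:
--                     if cc < half:
--                         val += 3 * k
--                     else:
--                         cc -= half
--                 else:
--                     if cc < half:
--                         val += 2 * k
--                         rr -= half
--                     else:
--                         val += k
--                         rr -= half
--                         cc -= half
--                 dim = half
--             row.append(val)
--         grid.append(row)
--     return grid
-- ===== Notes on version B (the rewrite author's own statement) =====
-- stated objective: alternative
-- what changed: B computes each cell's value directly by descending through the quadrant levels (per-cell offset accumulation) instead of A's building the grid level by level from the previous grid.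
import Mathlib
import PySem

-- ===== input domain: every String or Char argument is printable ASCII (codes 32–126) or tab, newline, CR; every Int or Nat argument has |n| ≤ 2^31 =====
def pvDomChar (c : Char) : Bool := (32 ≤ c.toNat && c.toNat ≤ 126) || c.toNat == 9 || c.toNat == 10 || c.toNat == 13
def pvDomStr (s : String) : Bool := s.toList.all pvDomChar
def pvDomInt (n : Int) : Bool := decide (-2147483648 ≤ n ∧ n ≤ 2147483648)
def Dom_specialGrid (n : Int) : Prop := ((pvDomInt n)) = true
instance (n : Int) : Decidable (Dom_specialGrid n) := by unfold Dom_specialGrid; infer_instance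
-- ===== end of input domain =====

-- B computes every cell of the 2^n×2^n grid directly by descending through the quadrant levels,
-- instead of A's level-by-level rebuild of the whole grid (objective: alternative decomposition).

-- ===== PORT A =====
-- Python 'grid[r][c] = v' with nonnegative in-range indices is exact as List.set on the row and grid.
def pvSetCell (g : List (List Int)) (r c : Nat) (v : Int) : List (List Int) :=
  g.set r ((g.getD r []).set c v)

-- the body of A's innermost loop: the four quadrant writes for source cell (r, c)
def pvWrite4 (prev : List (List Int)) (p : Nat) (g : List (List Int)) (r c : Nat) : List (List Int) :=
  let val := (prev.getD r []).getD c 0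
  let offsetK : Int := (p : Int) * (p : Int)
  pvSetCell
    (pvSetCell
      (pvSetCell
        (pvSetCell g r c (val + 3 * offsetK))
        r (c + p) (val + 0))
      (r + p) c (val + 2 * offsetK))
    (r + p) (c + p) (val + offsetK)

-- one iteration of A's outer 'for i' loop: build the 2p×2p grid from the p×p grid
def pvStepA (prev : List (List Int)) (p : Nat) : List (List Int) :=
  let currentDim := 2 * p
  let init := List.replicate currentDim (List.replicate currentDim (0 : Int))
  (List.range p).foldl (fun g r => (List.range p).foldl (fun g c => pvWrite4 prev p g r c) g) init

def specialGrid (n : Int) : List (List Int) :=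
  let currentGrid : List (List Int) := [[0]]
  if n = 0 then currentGrid
  else
    -- i ≥ 1 on this range, so (i-1).toNat is exact for Python's 1 << (i-1)
    (PySem.List.pyRange 1 (n + 1) 1).foldl (fun g i => pvStepA g (2 ^ (i - 1).toNat)) currentGrid

-- ===== PORT B =====
-- B's 'while dim > 1' loop halves dim = 2^m each pass; ported as structural recursion on the exponent m.
def pvCellB : Nat → Nat → Nat → Int
  | 0, _, _ => 0
  | m + 1, r, c =>
    let half : Nat := 2 ^ m
    let k : Int := (half : Int) * (half : Int)
    if r < half then
      if c < half then 3 * k + pvCellB m r c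
      else pvCellB m r (c - half)
    else
      if c < half then 2 * k + pvCellB m (r - half) c
      else k + pvCellB m (r - half) (c - half)

def specialGrid_alt (n : Int) : List (List Int) :=
  let m := if 0 < n then n.toNat else 0
  let size := 2 ^ m
  (List.range size).map (fun r => (List.range size).map (fun c => pvCellB m r c))

-- ===== PRECONDITION & SPEC =====
def Spec_specialGrid (n : Int) (out : List (List Int)) : Prop := out = specialGrid_alt n
instance (n : Int) (out : List (List Int)) : Decidable (Spec_specialGrid n out) := by unfold Spec_specialGrid; infer_instance

-- ===== CLAIM (what is proved, stated in full; the proofs are below) =====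
def Claim_equal_specialGrid : Prop := ∀ (n : Int), Dom_specialGrid n → Spec_specialGrid n (specialGrid n)

-- ===== LEMMAS AND PROOFS =====

def pvGetCell (g : List (List Int)) (R C : Nat) : Int := (g.getD R []).getD C 0

def pvShape (g : List (List Int)) (d : Nat) : Prop :=
  g.length = d ∧ ∀ row ∈ g, row.length = d

def pvTarget (prev : List (List Int)) (p : Nat) (R C : Nat) : Int :=
  ((prev.getD (if R < p then R else R - p) []).getD (if C < p then C else C - p) 0) +
    (if R < p then (if C < p then 3 * ((p : Int) * (p : Int)) else 0)
     else (if C < p then 2 * ((p : Int) * (p : Int)) else (p : Int) * (p : Int)))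

def pvGridB (m : Nat) : List (List Int) :=
  (List.range (2 ^ m)).map (fun r => (List.range (2 ^ m)).map (fun c => pvCellB m r c))

theorem pvShape_setCell {g : List (List Int)} {d : Nat} (hs : pvShape g d)
    (r c : Nat) (v : Int) : pvShape (pvSetCell g r c v) d := by
  obtain ⟨hl, hrow⟩ := hs
  by_cases hrg : r < g.length
  · refine ⟨by simpa [pvSetCell] using hl, ?_⟩
    intro row hmem
    rcases List.mem_or_eq_of_mem_set hmem with h | h
    · exact hrow _ h
    · subst h
      rw [List.length_set, List.getD_eq_getElem _ _ hrg]
      exact hrow _ (List.getElem_mem hrg)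
  · rw [pvSetCell, List.set_eq_of_length_le (Nat.le_of_not_lt hrg)]
    exact ⟨hl, hrow⟩

theorem pvGetCell_setCell {g : List (List Int)} {d r c : Nat} (hs : pvShape g d)
    (hr : r < d) (hc : c < d) (v : Int) (R C : Nat) :
    pvGetCell (pvSetCell g r c v) R C = if R = r ∧ C = c then v else pvGetCell g R C := by
  obtain ⟨hl, hrow⟩ := hs
  have hrg : r < g.length := by omega
  have hrlen : (g.getD r []).length = d := by
    rw [List.getD_eq_getElem _ _ hrg]
    exact hrow _ (List.getElem_mem hrg)
  unfold pvGetCell pvSetCell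
  simp only [List.getD_eq_getElem?_getD, List.getElem?_set]
  by_cases hR : r = R
  · subst hR
    rw [if_pos rfl, if_pos hrg]
    simp only [Option.getD_some]
    by_cases hC : c = C
    · subst hC
      rw [List.getElem?_set_self (by rw [← List.getD_eq_getElem?_getD]; omega),
        Option.getD_some]
      simp
    · rw [List.getElem?_set_ne hC, if_neg (by omega)]
  · rw [if_neg hR, if_neg (by omega)]

theorem pvShape_write4 {g : List (List Int)} {p : Nat} (hs : pvShape g (2 * p))
    (prev : List (List Int)) (r c : Nat) : pvShape (pvWrite4 prev p g r c) (2 * p) := by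
  unfold pvWrite4
  exact pvShape_setCell (pvShape_setCell (pvShape_setCell (pvShape_setCell hs _ _ _) _ _ _) _ _ _) _ _ _

theorem pvGetCell_set4 {g : List (List Int)} {d r c p : Nat} (hs : pvShape g d)
    (hr : r < d) (hrp : r + p < d) (hc : c < d) (hcp : c + p < d) (_hp : 0 < p)
    (v1 v2 v3 v4 : Int) (R C : Nat) :
    pvGetCell (pvSetCell (pvSetCell (pvSetCell (pvSetCell g r c v1) r (c + p) v2) (r + p) c v3) (r + p) (c + p) v4) R C =
      if R = r + p ∧ C = c + p then v4
      else if R = r + p ∧ C = c then v3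
      else if R = r ∧ C = c + p then v2
      else if R = r ∧ C = c then v1
      else pvGetCell g R C := by
  have hs1 := pvShape_setCell hs r c v1
  have hs2 := pvShape_setCell hs1 r (c + p) v2
  have hs3 := pvShape_setCell hs2 (r + p) c v3
  rw [pvGetCell_setCell hs3 hrp hcp v4 R C,
      pvGetCell_setCell hs2 hrp hc v3 R C,
      pvGetCell_setCell hs1 hr hcp v2 R C,
      pvGetCell_setCell hs hr hc v1 R C]

theorem pvGetCell_write4 {g : List (List Int)} {p r c : Nat} (hs : pvShape g (2 * p))
    (hr : r < p) (hc : c < p) (prev : List (List Int)) (R C : Nat) :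
    pvGetCell (pvWrite4 prev p g r c) R C =
      if (R = r ∨ R = r + p) ∧ (C = c ∨ C = c + p) then pvTarget prev p R C
      else pvGetCell g R C := by
  have hp : 0 < p := by omega
  unfold pvWrite4
  rw [pvGetCell_set4 hs (by omega) (by omega) (by omega) (by omega) hp _ _ _ _ R C]
  by_cases e1 : R = r + p ∧ C = c + p
  · rw [if_pos e1, if_pos (by omega)]
    obtain ⟨hR, hC⟩ := e1; subst hR; subst hC
    unfold pvTarget
    simp only [if_neg (show ¬ r + p < p by omega), if_neg (show ¬ c + p < p by omega),
      Nat.add_sub_cancel]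
  · rw [if_neg e1]
    by_cases e2 : R = r + p ∧ C = c
    · rw [if_pos e2, if_pos (by omega)]
      obtain ⟨hR, hC⟩ := e2; subst hR; subst hC
      unfold pvTarget
      simp only [if_neg (show ¬ r + p < p by omega), if_pos hc, Nat.add_sub_cancel]
    · rw [if_neg e2]
      by_cases e3 : R = r ∧ C = c + p
      · rw [if_pos e3, if_pos (by omega)]
        obtain ⟨hR, hC⟩ := e3; subst hR; subst hC
        unfold pvTarget
        simp only [if_pos hr, if_neg (show ¬ c + p < p by omega), Nat.add_sub_cancel]
      · rw [if_neg e3]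
        by_cases e4 : R = r ∧ C = c
        · rw [if_pos e4, if_pos (by omega)]
          obtain ⟨hR, hC⟩ := e4; subst hR; subst hC
          unfold pvTarget
          simp only [if_pos hr, if_pos hc]
        · rw [if_neg e4, if_neg (by omega)]

theorem pvInnerFold {g : List (List Int)} {p r : Nat} (hs : pvShape g (2 * p)) (hr : r < p)
    (prev : List (List Int)) (j : Nat) (hj : j ≤ p) :
    pvShape ((List.range j).foldl (fun g c => pvWrite4 prev p g r c) g) (2 * p) ∧
    ∀ R C : Nat,
      pvGetCell ((List.range j).foldl (fun g c => pvWrite4 prev p g r c) g) R C =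
        if (R = r ∨ R = r + p) ∧ (C < j ∨ (p ≤ C ∧ C < p + j)) then pvTarget prev p R C
        else pvGetCell g R C := by
  induction j with
  | zero =>
    refine ⟨by simpa using hs, ?_⟩
    intro R C
    simp only [List.range_zero, List.foldl_nil]
    rw [if_neg (by omega)]
  | succ j ih =>
    obtain ⟨ihs, ihg⟩ := ih (by omega)
    rw [List.range_succ, List.foldl_append, List.foldl_cons, List.foldl_nil]
    refine ⟨pvShape_write4 ihs prev r j, ?_⟩
    intro R C
    rw [pvGetCell_write4 ihs hr (by omega) prev R C, ihg R C]
    split_ifs <;> first | rfl | omega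

theorem pvOuterFold {g : List (List Int)} {p : Nat} (hs : pvShape g (2 * p))
    (prev : List (List Int)) (i : Nat) (hi : i ≤ p) :
    pvShape ((List.range i).foldl
      (fun g r => (List.range p).foldl (fun g c => pvWrite4 prev p g r c) g) g) (2 * p) ∧
    ∀ R C : Nat, C < 2 * p →
      pvGetCell ((List.range i).foldl
        (fun g r => (List.range p).foldl (fun g c => pvWrite4 prev p g r c) g) g) R C =
        if R < i ∨ (p ≤ R ∧ R < p + i) then pvTarget prev p R C
        else pvGetCell g R C := by
  induction i with
  | zero =>
    refine ⟨by simpa using hs, ?_⟩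
    intro R C _
    simp only [List.range_zero, List.foldl_nil]
    rw [if_neg (by omega)]
  | succ i ih =>
    obtain ⟨ihs, ihg⟩ := ih (by omega)
    rw [List.range_succ, List.foldl_append, List.foldl_cons, List.foldl_nil]
    obtain ⟨fs, fg⟩ := pvInnerFold ihs (show i < p by omega) prev p le_rfl
    refine ⟨fs, ?_⟩
    intro R C hC
    rw [fg R C, ihg R C hC]
    split_ifs <;> first | rfl | omega

theorem pvStepA_shape (prev : List (List Int)) (p : Nat) :
    pvShape (pvStepA prev p) (2 * p) := by
  have hinit : pvShape (List.replicate (2 * p) (List.replicate (2 * p) (0 : Int))) (2 * p) := by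
    refine ⟨by simp, ?_⟩
    intro row hmem
    rw [List.eq_of_mem_replicate hmem]
    simp
  simpa only [pvStepA] using (pvOuterFold hinit prev p le_rfl).1

theorem pvStepA_getCell (prev : List (List Int)) {p : Nat} (_hp : 0 < p)
    {R C : Nat} (hR : R < 2 * p) (hC : C < 2 * p) :
    pvGetCell (pvStepA prev p) R C = pvTarget prev p R C := by
  have hinit : pvShape (List.replicate (2 * p) (List.replicate (2 * p) (0 : Int))) (2 * p) := by
    refine ⟨by simp, ?_⟩
    intro row hmem
    rw [List.eq_of_mem_replicate hmem]
    simp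
  have h := (pvOuterFold hinit prev p le_rfl).2 R C hC
  simp only [pvStepA]
  rw [h, if_pos (by omega)]

theorem pvGetD_gridB (m : Nat) {r c : Nat} (hr : r < 2 ^ m) (hc : c < 2 ^ m) :
    ((pvGridB m).getD r []).getD c 0 = pvCellB m r c := by
  have h1 : r < (pvGridB m).length := by
    simp only [pvGridB, List.length_map, List.length_range]; omega
  rw [List.getD_eq_getElem _ _ h1]
  have h2 : c < (pvGridB m)[r].length := by
    simp only [pvGridB, List.getElem_map, List.getElem_range, List.length_map,
      List.length_range]; omega
  rw [List.getD_eq_getElem _ _ h2]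
  simp only [pvGridB, List.getElem_map, List.getElem_range]

theorem pvGridB_succ (m : Nat) : pvGridB (m + 1) = pvStepA (pvGridB m) (2 ^ m) := by
  have hp : 0 < 2 ^ m := by positivity
  have hdim : 2 ^ (m + 1) = 2 * 2 ^ m := by rw [pow_succ]; ring
  have hsh := pvStepA_shape (pvGridB m) (2 ^ m)
  apply List.ext_getElem
  · rw [hsh.1]
    simp only [pvGridB, List.length_map, List.length_range]
    exact hdim
  · intro R h1 h2
    have hR : R < 2 * 2 ^ m := by rw [hsh.1] at h2; exact h2
    have hrowlen : (pvStepA (pvGridB m) (2 ^ m))[R].length = 2 * 2 ^ m :=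
      hsh.2 _ (List.getElem_mem h2)
    apply List.ext_getElem
    · rw [hrowlen]
      simp only [pvGridB, List.getElem_map, List.getElem_range, List.length_map,
        List.length_range]
      exact hdim
    · intro C h3 h4
      have hC : C < 2 * 2 ^ m := by rw [hrowlen] at h4; exact h4
      have hcell : pvGetCell (pvStepA (pvGridB m) (2 ^ m)) R C =
          (pvStepA (pvGridB m) (2 ^ m))[R][C] := by
        unfold pvGetCell
        rw [List.getD_eq_getElem _ _ h2, List.getD_eq_getElem _ _ h4]
      have htarget : pvTarget (pvGridB m) (2 ^ m) R C = pvCellB (m + 1) R C := by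
        unfold pvTarget
        simp only [pvCellB]
        split_ifs with hA hB hB
        · rw [pvGetD_gridB m hA hB]; ring
        · rw [pvGetD_gridB m hA (by omega)]; ring
        · rw [pvGetD_gridB m (by omega) hB]; ring
        · rw [pvGetD_gridB m (by omega) (by omega)]; ring
      rw [← hcell, pvStepA_getCell (pvGridB m) hp hR hC, htarget]
      simp only [pvGridB, List.getElem_map, List.getElem_range]

theorem pvFold_eq_gridB (k : Nat) :
    (PySem.List.pyRange 1 ((k : Int) + 1) 1).foldl
      (fun g i => pvStepA g (2 ^ (i - 1).toNat)) [[0]] = pvGridB k := by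
  induction k with
  | zero =>
    rw [show ((0 : Nat) : Int) + 1 = 1 by norm_num, PySem.List.pyRange_one_eq_nil le_rfl]
    simp only [List.foldl_nil]
    decide
  | succ k ih =>
    rw [show ((k + 1 : Nat) : Int) + 1 = ((k : Int) + 1) + 1 by push_cast; ring,
        PySem.List.pyRange_one_succ_right (by omega : (1 : Int) ≤ (k : Int) + 1),
        List.foldl_append, ih, List.foldl_cons, List.foldl_nil]
    rw [show (((k : Int) + 1) - 1).toNat = k by omega]
    exact (pvGridB_succ k).symm

-- ===== VERDICT (by name: the statement is the Claim_ definition above) =====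
theorem specialGrid_spec : Claim_equal_specialGrid := by
  intro n _
  show specialGrid n = specialGrid_alt n
  by_cases hn0 : n = 0
  · subst hn0
    decide
  · by_cases hpos : 0 < n
    · have hn : n = ((n.toNat : Nat) : Int) := by omega
      simp only [specialGrid, specialGrid_alt, if_neg hn0, if_pos hpos]
      rw [show n + 1 = ((n.toNat : Nat) : Int) + 1 by omega]
      exact pvFold_eq_gridB n.toNat
    · simp only [specialGrid, specialGrid_alt, if_neg hn0, if_neg hpos]
      rw [PySem.List.pyRange_one_eq_nil (by omega : n + 1 ≤ 1)]
      simp only [List.foldl_nil]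
      decide
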